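-- pv_equiv track=rewrite | github.com/Airyshtoteles/learnLeetCode | learnLeetCode/Day29/Part2/monster_survival.py | max_survival_time
-- ===== SOURCE A (Python) =====
-- from collections import deque
-- from typing import List, Tuple
--
-- def max_survival_time(m: int, n: int, monsters: List[Tuple[int,int]], start: Tuple[int,int]) -> int:
--     INF = 10**9
--     Tm = [[INF]*n for _ in range(m)]
--     q = deque()
--     for x,y in monsters:
--         if 0 <= x < m and 0 <= y < n:
--             Tm[x][y] = 0
--             q.append((x,y))
--     # multi-source BFS for monsters
--     dirs = [(-1,0),(1,0),(0,-1),(0,1)]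
--     while q:
--         x,y = q.popleft()
--         for dx,dy in dirs:
--             nx,ny = x+dx, y+dy
--             if 0<=nx<m and 0<=ny<n and Tm[nx][ny] > Tm[x][y] + 1:
--                 Tm[nx][ny] = Tm[x][y] + 1
--                 q.append((nx,ny))
--     sx, sy = start
--     if not (0 <= sx < m and 0 <= sy < n):
--         return -1
--     if Tm[sx][sy] == 0:
--         return -1
--     # BFS for player
--     Tp = [[-1]*n for _ in range(m)]
--     Tp[sx][sy] = 0
--     q.append((sx,sy))
--     best = -1
--     while q:
--         x,y = q.popleft()
--         t = Tp[x][y]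
--         if t < Tm[x][y]:
--             if t > best:
--                 best = t
--         for dx,dy in dirs:
--             nx,ny = x+dx, y+dy
--             if 0<=nx<m and 0<=ny<n and Tp[nx][ny] == -1:
--                 nt = t + 1
--                 # can move there, but only counts as safe if nt < Tm[nx][ny]
--                 Tp[nx][ny] = nt
--                 q.append((nx,ny))
--     return best
-- ===== SOURCE B (Python) =====
-- def max_survival_time(m, n, monsters, start):
--     INF = 10**9
--     sx, sy = start
--     if not (0 <= sx < m and 0 <= sy < n):
--         return -1
--     ms = [(x, y) for x, y in monsters if 0 <= x < m and 0 <= y < n]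
--
--     def dm(i, j):
--         # BFS distance in an obstacle-free 4-directional grid = Manhattan distance,
--         # capped (via the seed INF) exactly as the relaxation would leave it.
--         d = INF
--         for x, y in ms:
--             d = min(d, abs(i - x) + abs(j - y))
--         return d
--
--     if dm(sx, sy) == 0:
--         return -1
--     best = -1
--     for i in range(m):
--         for j in range(n):
--             ds = abs(i - sx) + abs(j - sy)
--             if ds < dm(i, j) and best < ds:
--                 best = ds
--     return best
-- ===== Notes on version B (the rewrite author's own statement) =====
-- stated objective: simpler
-- what changed: Replaces the two BFS passes (multi-source monster BFS with relaxation queue, then a player BFS) by the closed form valid on an obstacle-free 4-directional grid: BFS distance = Manhattan distance, so B takes the max of |i-sx|+|j-sy| over all cells where it is strictly below the (INF-capped) minimal Manhattan distance to an in-bounds monster.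
import Mathlib
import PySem

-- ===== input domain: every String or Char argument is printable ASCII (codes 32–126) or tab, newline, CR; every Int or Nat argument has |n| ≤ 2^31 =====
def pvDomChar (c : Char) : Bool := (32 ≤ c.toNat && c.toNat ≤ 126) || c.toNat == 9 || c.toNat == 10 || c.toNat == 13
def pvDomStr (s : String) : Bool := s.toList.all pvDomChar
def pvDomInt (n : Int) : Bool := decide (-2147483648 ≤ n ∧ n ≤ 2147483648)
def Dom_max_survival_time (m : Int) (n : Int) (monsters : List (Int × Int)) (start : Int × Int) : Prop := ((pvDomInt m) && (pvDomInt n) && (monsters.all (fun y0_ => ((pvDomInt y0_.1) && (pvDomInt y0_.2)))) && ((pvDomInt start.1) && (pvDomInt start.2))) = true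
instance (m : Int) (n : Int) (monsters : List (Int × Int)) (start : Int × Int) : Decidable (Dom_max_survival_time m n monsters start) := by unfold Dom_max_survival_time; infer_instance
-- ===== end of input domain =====

-- B replaces A's two BFS passes by the Manhattan-distance closed form that is exact on this
-- obstacle-free 4-directional grid (same INF seed, same strict '<'); objective: simpler.

-- ===== PORT A =====
def pvINF : Int := 10 ^ 9

def pvDirs : List (Int × Int) := [(-1, 0), (1, 0), (0, -1), (0, 1)]

def pvInb (m n : Int) (c : Int × Int) : Bool :=
  decide (0 ≤ c.1) && decide (c.1 < m) && decide (0 ≤ c.2) && decide (c.2 < n)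

-- A's 2D arrays Tm/Tp are ported as Std.HashMap (Int × Int) Int with the array's fill value
-- as lookup default; every array read/write in A is in-bounds-guarded exactly as in the source.
def pvMStepH (m n : Int) (c : Int × Int)
    (s : Std.HashMap (Int × Int) Int × List (Int × Int)) (d : Int × Int) :
    Std.HashMap (Int × Int) Int × List (Int × Int) :=
  let nc := (c.1 + d.1, c.2 + d.2)
  if pvInb m n nc && decide (s.1.getD c pvINF + 1 < s.1.getD nc pvINF) then
    (s.1.insert nc (s.1.getD c pvINF + 1), s.2 ++ [nc])
  else s

-- 'while q:' of the monster BFS; the fuel only makes the recursion structural, the proofs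
-- below show the fuel supplied in max_survival_time is never exhausted.
def pvMLoopH (m n : Int) :
    Nat → Std.HashMap (Int × Int) Int → List (Int × Int) → Std.HashMap (Int × Int) Int
  | 0, Tm, _ => Tm
  | _ + 1, Tm, [] => Tm
  | fuel + 1, Tm, c :: rest =>
    let s := pvDirs.foldl (pvMStepH m n c) (Tm, rest)
    pvMLoopH m n fuel s.1 s.2

def pvPStepH (m n : Int) (c : Int × Int) (t : Int)
    (s : Std.HashMap (Int × Int) Int × List (Int × Int)) (d : Int × Int) :
    Std.HashMap (Int × Int) Int × List (Int × Int) :=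
  let nc := (c.1 + d.1, c.2 + d.2)
  if pvInb m n nc && decide (s.1.getD nc (-1) = -1) then
    (s.1.insert nc (t + 1), s.2 ++ [nc])
  else s

-- 'while q:' of the player BFS, same fuel remark.
def pvPLoopH (m n : Int) (Tm : Std.HashMap (Int × Int) Int) :
    Nat → Std.HashMap (Int × Int) Int → Int → List (Int × Int) → Int
  | 0, _, best, _ => best
  | _ + 1, _, best, [] => best
  | fuel + 1, Tp, best, c :: rest =>
    let t := Tp.getD c (-1)
    let best' := if decide (t < Tm.getD c pvINF) && decide (best < t) then t else best
    let s := pvDirs.foldl (pvPStepH m n c t) (Tp, rest)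
    pvPLoopH m n Tm fuel s.1 best' s.2

def max_survival_time (m : Int) (n : Int) (monsters : List (Int × Int)) (start : Int × Int) : Int :=
  let init := monsters.foldl
    (fun (s : Std.HashMap (Int × Int) Int × List (Int × Int)) mo =>
      if pvInb m n mo then (s.1.insert mo 0, s.2 ++ [mo]) else s)
    (∅, [])
  let Tm := pvMLoopH m n (m.toNat * n.toNat * 10 ^ 9 + monsters.length + 1) init.1 init.2
  if !pvInb m n start then -1
  else if Tm.getD start pvINF == 0 then -1
  else pvPLoopH m n Tm (m.toNat * n.toNat + 1)
    ((∅ : Std.HashMap (Int × Int) Int).insert start 0) (-1) [start]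

-- ===== PORT B =====
-- Source B's helper dm(i, j): INF-seeded running minimum of Manhattan distances to in-bounds monsters.
def pvBDm (m n : Int) (monsters : List (Int × Int)) (c : Int × Int) : Int :=
  (monsters.filter (pvInb m n)).foldl (fun d mo => min d (|c.1 - mo.1| + |c.2 - mo.2|)) pvINF

def max_survival_time_alt (m : Int) (n : Int) (monsters : List (Int × Int)) (start : Int × Int) : Int :=
  if !pvInb m n start then -1
  else if pvBDm m n monsters start == 0 then -1
  else
    (PySem.List.pyRange 0 m 1).foldl (fun best i =>
      (PySem.List.pyRange 0 n 1).foldl (fun best j =>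
        let ds := |i - start.1| + |j - start.2|
        if decide (ds < pvBDm m n monsters (i, j)) && decide (best < ds) then ds else best) best)
      (-1)

-- ===== PRECONDITION & SPEC =====
def Spec_max_survival_time (m : Int) (n : Int) (monsters : List (Int × Int)) (start : Int × Int) (out : Int) : Prop := out = max_survival_time_alt m n monsters start
instance (m : Int) (n : Int) (monsters : List (Int × Int)) (start : Int × Int) (out : Int) : Decidable (Spec_max_survival_time m n monsters start out) := by unfold Spec_max_survival_time; infer_instance

-- ===== CLAIM (what is proved, stated in full; the proofs are below) =====
def Claim_equal_max_survival_time : Prop := ∀ (m : Int) (n : Int) (monsters : List (Int × Int)) (start : Int × Int), Dom_max_survival_time m n monsters start → Spec_max_survival_time m n monsters start (max_survival_time m n monsters start)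

-- ===== LEMMAS AND PROOFS =====

def pvMStep (m n : Int) (c : Int × Int)
    (s : ((Int × Int) → Int) × List (Int × Int)) (d : Int × Int) :
    ((Int × Int) → Int) × List (Int × Int) :=
  let nc := (c.1 + d.1, c.2 + d.2)
  if pvInb m n nc && decide (s.1 c + 1 < s.1 nc) then
    (fun z => if z = nc then s.1 c + 1 else s.1 z, s.2 ++ [nc])
  else s

def pvMLoop (m n : Int) : Nat → ((Int × Int) → Int) → List (Int × Int) → ((Int × Int) → Int)
  | 0, Tm, _ => Tm
  | _ + 1, Tm, [] => Tm
  | fuel + 1, Tm, c :: rest =>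
    let s := pvDirs.foldl (pvMStep m n c) (Tm, rest)
    pvMLoop m n fuel s.1 s.2

def pvPStep (m n : Int) (c : Int × Int) (t : Int)
    (s : ((Int × Int) → Int) × List (Int × Int)) (d : Int × Int) :
    ((Int × Int) → Int) × List (Int × Int) :=
  let nc := (c.1 + d.1, c.2 + d.2)
  if pvInb m n nc && decide (s.1 nc = -1) then
    (fun z => if z = nc then t + 1 else s.1 z, s.2 ++ [nc])
  else s

def pvPLoop (m n : Int) (Tm : (Int × Int) → Int) :
    Nat → ((Int × Int) → Int) → Int → List (Int × Int) → Int
  | 0, _, best, _ => best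
  | _ + 1, _, best, [] => best
  | fuel + 1, Tp, best, c :: rest =>
    let t := Tp c
    let best' := if decide (t < Tm c) && decide (best < t) then t else best
    let s := pvDirs.foldl (pvPStep m n c t) (Tp, rest)
    pvPLoop m n Tm fuel s.1 best' s.2

-- functional mirror of port A (same algorithm on function-valued arrays); used only in proofs
def pvAFn (m : Int) (n : Int) (monsters : List (Int × Int)) (start : Int × Int) : Int :=
  let init := monsters.foldl
    (fun (s : ((Int × Int) → Int) × List (Int × Int)) mo =>
      if pvInb m n mo then (fun z => if z = mo then 0 else s.1 z, s.2 ++ [mo]) else s)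
    (fun _ => pvINF, [])
  let Tm := pvMLoop m n (m.toNat * n.toNat * 10 ^ 9 + monsters.length + 1) init.1 init.2
  if !pvInb m n start then -1
  else if Tm start == 0 then -1
  else pvPLoop m n Tm (m.toNat * n.toNat + 1) (fun z => if z = start then 0 else -1) (-1) [start]


-- ---------- basic geometry ----------
def pvNbr (c d : Int × Int) : Int × Int := (c.1 + d.1, c.2 + d.2)

def pvI (m n : Int) (c : Int × Int) : Prop := 0 ≤ c.1 ∧ c.1 < m ∧ 0 ≤ c.2 ∧ c.2 < n

def pvMd (a b : Int × Int) : Int := |a.1 - b.1| + |a.2 - b.2|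

lemma pvInb_iff (m n : Int) (c : Int × Int) : pvInb m n c = true ↔ pvI m n c := by
  simp [pvInb, pvI, and_assoc]

lemma pvMd_nonneg (a b : Int × Int) : 0 ≤ pvMd a b := by
  have h1 := abs_nonneg (a.1 - b.1); have h2 := abs_nonneg (a.2 - b.2)
  simp only [pvMd]; omega

lemma pvMd_self (a : Int × Int) : pvMd a a = 0 := by simp [pvMd]

lemma pvMd_eq_zero {a b : Int × Int} (h : pvMd a b = 0) : a = b := by
  have h1 := abs_nonneg (a.1 - b.1); have h2 := abs_nonneg (a.2 - b.2)
  simp only [pvMd] at h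
  have e1 : a.1 = b.1 := by have := abs_eq_zero.mp (show |a.1 - b.1| = 0 by omega); omega
  have e2 : a.2 = b.2 := by have := abs_eq_zero.mp (show |a.2 - b.2| = 0 by omega); omega
  exact Prod.ext e1 e2

lemma pvDirs_cases {d : Int × Int} (h : d ∈ pvDirs) :
    d = (-1, 0) ∨ d = (1, 0) ∨ d = (0, -1) ∨ d = (0, 1) := by
  simpa [pvDirs] using h

lemma pvNbr_ne {c d : Int × Int} (h : d ∈ pvDirs) : pvNbr c d ≠ c := by
  intro hc
  have h1 : c.1 + d.1 = c.1 := congrArg Prod.fst hc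
  have h2 : c.2 + d.2 = c.2 := congrArg Prod.snd hc
  rcases pvDirs_cases h with rfl | rfl | rfl | rfl <;> simp at h1 h2

lemma pvNeg_mem {d : Int × Int} (h : d ∈ pvDirs) :
    ∃ d' ∈ pvDirs, ∀ c : Int × Int, pvNbr (pvNbr c d) d' = c := by
  rcases pvDirs_cases h with rfl | rfl | rfl | rfl
  · exact ⟨(1, 0), by simp [pvDirs], fun c => by simp [pvNbr]⟩
  · exact ⟨(-1, 0), by simp [pvDirs], fun c => by simp [pvNbr]⟩
  · exact ⟨(0, 1), by simp [pvDirs], fun c => by simp [pvNbr]⟩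
  · exact ⟨(0, -1), by simp [pvDirs], fun c => by simp [pvNbr]⟩

lemma pvAbs_pair (x y x' y' : Int)
    (h : (x' = x ∧ (y' = y + 1 ∨ y' = y - 1)) ∨ (y' = y ∧ (x' = x + 1 ∨ x' = x - 1))) :
    |x'| + |y'| ≤ |x| + |y| + 1 := by
  rcases abs_cases x with ⟨h1, _⟩ | ⟨h1, _⟩ <;> rcases abs_cases y with ⟨h2, _⟩ | ⟨h2, _⟩ <;>
    rcases abs_cases x' with ⟨h3, _⟩ | ⟨h3, _⟩ <;> rcases abs_cases y' with ⟨h4, _⟩ | ⟨h4, _⟩ <;>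
    omega

lemma pvMd_lip {d : Int × Int} (h : d ∈ pvDirs) (c b : Int × Int) :
    pvMd (pvNbr c d) b ≤ pvMd c b + 1 := by
  rcases pvDirs_cases h with rfl | rfl | rfl | rfl
  · exact pvAbs_pair (c.1 - b.1) (c.2 - b.2) (c.1 + -1 - b.1) (c.2 + 0 - b.2) (by omega)
  · exact pvAbs_pair (c.1 - b.1) (c.2 - b.2) (c.1 + 1 - b.1) (c.2 + 0 - b.2) (by omega)
  · exact pvAbs_pair (c.1 - b.1) (c.2 - b.2) (c.1 + 0 - b.1) (c.2 + -1 - b.2) (by omega)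
  · exact pvAbs_pair (c.1 - b.1) (c.2 - b.2) (c.1 + 0 - b.1) (c.2 + 1 - b.2) (by omega)

lemma pvStraighten (m n : Int) {a b : Int × Int} (ha : pvI m n a) (hb : pvI m n b)
    (hne : a ≠ b) :
    ∃ d ∈ pvDirs, pvI m n (pvNbr a d) ∧ pvMd (pvNbr a d) b = pvMd a b - 1 := by
  have hab : a.1 ≠ b.1 ∨ (a.1 = b.1 ∧ a.2 ≠ b.2) := by
    by_cases h1 : a.1 = b.1
    · refine Or.inr ⟨h1, ?_⟩; intro h2; exact hne (Prod.ext h1 h2)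
    · exact Or.inl h1
  obtain ⟨ha1, ha2, ha3, ha4⟩ := ha; obtain ⟨hb1, hb2, hb3, hb4⟩ := hb
  rcases hab with h1 | ⟨h1, h2⟩
  · rcases lt_or_gt_of_ne h1 with hlt | hgt
    · refine ⟨(1, 0), by simp [pvDirs], by simp only [pvI, pvNbr]; omega, ?_⟩
      simp only [pvMd, pvNbr]
      rcases abs_cases (a.1 - b.1) with ⟨e1, _⟩ | ⟨e1, _⟩ <;>
        rcases abs_cases (a.1 + 1 - b.1) with ⟨e2, _⟩ | ⟨e2, _⟩ <;>
        rcases abs_cases (a.2 + 0 - b.2) with ⟨e3, _⟩ | ⟨e3, _⟩ <;>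
        rcases abs_cases (a.2 - b.2) with ⟨e4, _⟩ | ⟨e4, _⟩ <;> omega
    · refine ⟨(-1, 0), by simp [pvDirs], by simp only [pvI, pvNbr]; omega, ?_⟩
      simp only [pvMd, pvNbr]
      rcases abs_cases (a.1 - b.1) with ⟨e1, _⟩ | ⟨e1, _⟩ <;>
        rcases abs_cases (a.1 + -1 - b.1) with ⟨e2, _⟩ | ⟨e2, _⟩ <;>
        rcases abs_cases (a.2 + 0 - b.2) with ⟨e3, _⟩ | ⟨e3, _⟩ <;>
        rcases abs_cases (a.2 - b.2) with ⟨e4, _⟩ | ⟨e4, _⟩ <;> omega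
  · rcases lt_or_gt_of_ne h2 with hlt | hgt
    · refine ⟨(0, 1), by simp [pvDirs], by simp only [pvI, pvNbr]; omega, ?_⟩
      simp only [pvMd, pvNbr]
      rcases abs_cases (a.1 + 0 - b.1) with ⟨e1, _⟩ | ⟨e1, _⟩ <;>
        rcases abs_cases (a.1 - b.1) with ⟨e2, _⟩ | ⟨e2, _⟩ <;>
        rcases abs_cases (a.2 + 1 - b.2) with ⟨e3, _⟩ | ⟨e3, _⟩ <;>
        rcases abs_cases (a.2 - b.2) with ⟨e4, _⟩ | ⟨e4, _⟩ <;> omega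
    · refine ⟨(0, -1), by simp [pvDirs], by simp only [pvI, pvNbr]; omega, ?_⟩
      simp only [pvMd, pvNbr]
      rcases abs_cases (a.1 + 0 - b.1) with ⟨e1, _⟩ | ⟨e1, _⟩ <;>
        rcases abs_cases (a.1 - b.1) with ⟨e2, _⟩ | ⟨e2, _⟩ <;>
        rcases abs_cases (a.2 + -1 - b.2) with ⟨e3, _⟩ | ⟨e3, _⟩ <;>
        rcases abs_cases (a.2 - b.2) with ⟨e4, _⟩ | ⟨e4, _⟩ <;> omega

-- ---------- folded minimum ----------
lemma pvFoldMin_le_init (f : (Int × Int) → Int) :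
    ∀ (l : List (Int × Int)) (a : Int), (l.foldl (fun d mo => min d (f mo)) a) ≤ a := by
  intro l
  induction l with
  | nil => intro a; simp
  | cons x xs ih =>
      intro a
      simpa using le_trans (ih (min a (f x))) (min_le_left _ _)

lemma pvFoldMin_le_mem (f : (Int × Int) → Int) :
    ∀ (l : List (Int × Int)) (a : Int) (mo : Int × Int), mo ∈ l →
      (l.foldl (fun d mo => min d (f mo)) a) ≤ f mo := by
  intro l
  induction l with
  | nil => intro a mo h; simp at h
  | cons x xs ih =>
      intro a mo h
      rcases List.mem_cons.mp h with rfl | h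
      · simpa using le_trans (pvFoldMin_le_init f xs (min a (f mo))) (min_le_right _ _)
      · simpa using ih (min a (f x)) mo h

lemma pvLe_foldMin (f : (Int × Int) → Int) :
    ∀ (l : List (Int × Int)) (a x : Int), x ≤ a → (∀ mo ∈ l, x ≤ f mo) →
      x ≤ (l.foldl (fun d mo => min d (f mo)) a) := by
  intro l
  induction l with
  | nil => intro a x hx _; simpa using hx
  | cons y ys ih =>
      intro a x hx h
      simpa using ih (min a (f y)) x (le_min hx (h y (by simp)))
        (fun mo hm => h mo (by simp [hm]))

lemma pvFoldMin_lip (f g : (Int × Int) → Int) (k : Int) :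
    ∀ (l : List (Int × Int)) (a b : Int), a ≤ b + k → (∀ mo ∈ l, f mo ≤ g mo + k) →
      (l.foldl (fun d mo => min d (f mo)) a) ≤ (l.foldl (fun d mo => min d (g mo)) b) + k := by
  intro l
  induction l with
  | nil => intro a b h _; simpa using h
  | cons y ys ih =>
      intro a b h hfg
      simp only [List.foldl_cons]
      refine ih (min a (f y)) (min b (g y)) ?_ (fun mo hm => hfg mo (by simp [hm]))
      have := hfg y (by simp)
      rcases le_total a (f y) with h1 | h1 <;> rcases le_total b (g y) with h2 | h2 <;>
        simp [min_def] <;> omega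

-- ---------- pvBDm facts ----------
lemma pvBDm_eq (m n : Int) (monsters : List (Int × Int)) (c : Int × Int) :
    pvBDm m n monsters c =
      (monsters.filter (pvInb m n)).foldl (fun d mo => min d (pvMd c mo)) pvINF := rfl

lemma pvINF_pos : (0 : Int) < pvINF := by norm_num [pvINF]

lemma pvBDm_le_INF (m n : Int) (monsters : List (Int × Int)) (c : Int × Int) :
    pvBDm m n monsters c ≤ pvINF := by
  rw [pvBDm_eq]; exact pvFoldMin_le_init _ _ _

lemma pvBDm_le_mem (m n : Int) (monsters : List (Int × Int)) {c mo : Int × Int}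
    (h : mo ∈ monsters.filter (pvInb m n)) : pvBDm m n monsters c ≤ pvMd c mo := by
  rw [pvBDm_eq]; exact pvFoldMin_le_mem _ _ _ _ h

lemma pvLe_pvBDm (m n : Int) (monsters : List (Int × Int)) {c : Int × Int} {x : Int}
    (h1 : x ≤ pvINF) (h2 : ∀ mo ∈ monsters.filter (pvInb m n), x ≤ pvMd c mo) :
    x ≤ pvBDm m n monsters c := by
  rw [pvBDm_eq]; exact pvLe_foldMin _ _ _ _ h1 h2

lemma pvBDm_lip (m n : Int) (monsters : List (Int × Int)) {d : Int × Int} (hd : d ∈ pvDirs)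
    (c : Int × Int) : pvBDm m n monsters (pvNbr c d) ≤ pvBDm m n monsters c + 1 := by
  rw [pvBDm_eq, pvBDm_eq]
  exact pvFoldMin_lip _ _ 1 _ _ _ (by omega) (fun mo _ => pvMd_lip hd c mo)

-- ---------- grid, sum and count measures ----------
noncomputable def pvG (m n : Int) : Finset (Int × Int) := Finset.Ico 0 m ×ˢ Finset.Ico 0 n

lemma pvMem_G {m n : Int} {c : Int × Int} : c ∈ pvG m n ↔ pvI m n c := by
  simp [pvG, pvI, Finset.mem_product, Finset.mem_Ico, and_assoc]

lemma pvCard_G (m n : Int) : (pvG m n).card = m.toNat * n.toNat := by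
  simp [pvG, Int.card_Ico]

noncomputable def pvSum (m n : Int) (T : (Int × Int) → Int) : Nat := ∑ c ∈ pvG m n, (T c).toNat

noncomputable def pvU (m n : Int) (T : (Int × Int) → Int) : Nat :=
  ((pvG m n).filter (fun c => T c = -1)).card

lemma pvSum_update (m n : Int) (T : (Int × Int) → Int) {nc : Int × Int} {v : Int}
    (hI : pvI m n nc) (hv : 0 ≤ v) (hlt : v < T nc) :
    pvSum m n (fun z => if z = nc then v else T z) + 1 ≤ pvSum m n T := by
  classical
  have hmem : nc ∈ pvG m n := pvMem_G.mpr hI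
  have key : ∀ (f : (Int × Int) → Int),
      (∑ c ∈ pvG m n, (f c).toNat) = (f nc).toNat + ∑ c ∈ (pvG m n).erase nc, (f c).toNat :=
    fun f => (Finset.add_sum_erase _ (fun c => (f c).toNat) hmem).symm
  have heq : ∑ c ∈ (pvG m n).erase nc, ((fun z => if z = nc then v else T z) c).toNat
      = ∑ c ∈ (pvG m n).erase nc, (T c).toNat := by
    refine Finset.sum_congr rfl (fun x hx => ?_)
    have hxne : x ≠ nc := (Finset.mem_erase.mp hx).1
    simp [hxne]
  simp [pvSum, key, heq]
  omega

lemma pvSum_le (m n : Int) (T : (Int × Int) → Int) (hT : ∀ c, T c ≤ pvINF) :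
    pvSum m n T ≤ m.toNat * n.toNat * 10 ^ 9 := by
  have h := Finset.sum_le_card_nsmul (pvG m n) (fun c => (T c).toNat) (10 ^ 9)
    (fun c _ => by have := hT c; norm_num [pvINF] at this ⊢; omega)
  simpa [pvSum, pvCard_G, smul_eq_mul] using h

lemma pvU_update (m n : Int) (T : (Int × Int) → Int) {nc : Int × Int} {v : Int}
    (hI : pvI m n nc) (h0 : T nc = -1) (hv : v ≠ -1) :
    pvU m n (fun z => if z = nc then v else T z) + 1 ≤ pvU m n T := by
  classical
  have hmem : nc ∈ (pvG m n).filter (fun c => T c = -1) := by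
    simp [Finset.mem_filter, pvMem_G.mpr hI, h0]
  have hsub : (pvG m n).filter (fun c => (if c = nc then v else T c) = -1)
      ⊆ ((pvG m n).filter (fun c => T c = -1)).erase nc := by
    intro c hc
    rw [Finset.mem_filter] at hc
    by_cases h : c = nc
    · subst h; simp at hc; exact absurd hc.2 hv
    · rw [Finset.mem_erase]
      refine ⟨h, ?_⟩
      rw [Finset.mem_filter]
      refine ⟨hc.1, ?_⟩
      simpa [h] using hc.2
  have h1 := Finset.card_le_card hsub
  have h2 := Finset.card_erase_of_mem hmem
  have h3 : 0 < ((pvG m n).filter (fun c => T c = -1)).card := Finset.card_pos.mpr ⟨nc, hmem⟩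
  simp only [pvU]
  omega

-- ---------- monster BFS: invariant, termination, characterization ----------
def pvEdge (m n : Int) (T : (Int × Int) → Int) (x : Int × Int) : Prop :=
  ∀ d ∈ pvDirs, pvI m n (pvNbr x d) → T (pvNbr x d) ≤ T x + 1

def pvMCore (m n : Int) (monsters : List (Int × Int)) (T : (Int × Int) → Int)
    (q : List (Int × Int)) : Prop :=
  (∀ c, 0 ≤ T c ∧ T c ≤ pvINF) ∧ (∀ c ∈ q, pvI m n c) ∧
  (∀ c, pvBDm m n monsters c ≤ T c) ∧
  (∀ mo ∈ monsters.filter (pvInb m n), T mo = 0)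

lemma pvMStep_eq (m n : Int) (c : Int × Int) (T : (Int × Int) → Int)
    (q : List (Int × Int)) (d : Int × Int) :
    pvMStep m n c (T, q) d =
      if pvInb m n (pvNbr c d) && decide (T c + 1 < T (pvNbr c d)) then
        (fun z => if z = pvNbr c d then T c + 1 else T z, q ++ [pvNbr c d])
      else (T, q) := rfl

lemma pvMInner (m n : Int) (monsters : List (Int × Int)) (c : Int × Int) :
    ∀ (l : List (Int × Int)), (∀ d ∈ l, d ∈ pvDirs) →
    ∀ (T : (Int × Int) → Int) (q : List (Int × Int)), pvMCore m n monsters T q →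
    pvMCore m n monsters (l.foldl (pvMStep m n c) (T, q)).1 (l.foldl (pvMStep m n c) (T, q)).2 ∧
    (∀ z, (l.foldl (pvMStep m n c) (T, q)).1 z ≤ T z) ∧
    (l.foldl (pvMStep m n c) (T, q)).1 c = T c ∧
    (∃ app, (l.foldl (pvMStep m n c) (T, q)).2 = q ++ app ∧
      (∀ z, (l.foldl (pvMStep m n c) (T, q)).1 z ≠ T z → z ∈ app)) ∧
    (∀ d ∈ l, pvI m n (pvNbr c d) →
      (l.foldl (pvMStep m n c) (T, q)).1 (pvNbr c d) ≤ (l.foldl (pvMStep m n c) (T, q)).1 c + 1) ∧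
    pvSum m n (l.foldl (pvMStep m n c) (T, q)).1 + (l.foldl (pvMStep m n c) (T, q)).2.length ≤
      pvSum m n T + q.length := by
  intro l
  induction l with
  | nil =>
      intro _ T q h
      exact ⟨h, fun z => le_refl _, rfl, ⟨[], by simp, by simp⟩, by simp, by simp⟩
  | cons d l ih =>
      intro hl T q h
      obtain ⟨ha, hb, hlow, hmon⟩ := h
      have hd : d ∈ pvDirs := hl d (by simp)
      have hl' : ∀ d' ∈ l, d' ∈ pvDirs := fun d' h' => hl d' (by simp [h'])
      have hne : pvNbr c d ≠ c := pvNbr_ne hd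
      simp only [List.foldl_cons, pvMStep_eq]
      by_cases hg : (pvInb m n (pvNbr c d) && decide (T c + 1 < T (pvNbr c d))) = true
      · rw [if_pos hg]
        rw [Bool.and_eq_true, decide_eq_true_iff] at hg
        have hI : pvI m n (pvNbr c d) := (pvInb_iff m n _).mp hg.1
        have hlt : T c + 1 < T (pvNbr c d) := hg.2
        set T1 : (Int × Int) → Int := fun z => if z = pvNbr c d then T c + 1 else T z with hT1
        have hT1c : T1 c = T c := by simp [hT1, Ne.symm hne]
        have hmono1 : ∀ z, T1 z ≤ T z := by
          intro z; by_cases hz : z = pvNbr c d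
          · subst hz; simp [hT1]; omega
          · simp [hT1, hz]
        have hcore1 : pvMCore m n monsters T1 (q ++ [pvNbr c d]) := by
          refine ⟨?_, ?_, ?_, ?_⟩
          · intro z; by_cases hz : z = pvNbr c d
            · subst hz; simp [hT1]
              have := (ha c).1; have := (ha (pvNbr c d)).2; omega
            · simp [hT1, hz]; exact ha z
          · intro z hz
            rcases List.mem_append.mp hz with hz | hz
            · exact hb z hz
            · simp at hz; subst hz; exact hI
          · intro z; by_cases hz : z = pvNbr c d
            · subst hz; simp [hT1]
              have := pvBDm_lip m n monsters hd c
              have := hlow c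
              omega
            · simp [hT1, hz]; exact hlow z
          · intro mo hmo
            by_cases hz : mo = pvNbr c d
            · exfalso
              have h0 : T mo = 0 := hmon mo hmo
              rw [hz] at h0
              have := (ha c).1; omega
            · simp [hT1, hz]; exact hmon mo hmo
        obtain ⟨hcore', hmono', hc', ⟨app, happ, hch⟩, hdirs', hsum'⟩ := ih hl' T1 (q ++ [pvNbr c d]) hcore1
        refine ⟨hcore', ?_, ?_, ⟨pvNbr c d :: app, ?_, ?_⟩, ?_, ?_⟩
        · intro z; exact le_trans (hmono' z) (hmono1 z)
        · rw [hc', hT1c]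
        · rw [happ]; simp
        · intro z hz
          by_cases h1 : (l.foldl (pvMStep m n c) (T1, q ++ [pvNbr c d])).1 z = T1 z
          · rw [h1] at hz
            have : z = pvNbr c d := by
              by_contra hzz
              exact hz (by simp [hT1, hzz])
            simp [this]
          · simpa using Or.inr (hch z h1)
        · intro d' hd' hI'
          rcases List.mem_cons.mp hd' with rfl | hd'
          · calc (l.foldl (pvMStep m n c) (T1, q ++ [pvNbr c d'])).1 (pvNbr c d')
                ≤ T1 (pvNbr c d') := hmono' _
              _ = T c + 1 := by simp [hT1]
              _ = (l.foldl (pvMStep m n c) (T1, q ++ [pvNbr c d'])).1 c + 1 := by rw [hc', hT1c]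
          · exact hdirs' d' hd' hI'
        · have hup := pvSum_update m n T (nc := pvNbr c d) (v := T c + 1) hI
            (by have := (ha c).1; omega) hlt
          have : pvSum m n T1 + (q ++ [pvNbr c d]).length ≤ pvSum m n T + q.length := by
            simp only [List.length_append, List.length_cons, List.length_nil]
            have h2 : pvSum m n T1 = pvSum m n (fun z => if z = pvNbr c d then T c + 1 else T z) := rfl
            omega
          omega
      · rw [if_neg hg]
        obtain ⟨hcore', hmono', hc', ⟨app, happ, hch⟩, hdirs', hsum'⟩ := ih hl' T q ⟨ha, hb, hlow, hmon⟩
        refine ⟨hcore', hmono', hc', ⟨app, happ, hch⟩, ?_, hsum'⟩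
        intro d' hd' hI'
        rcases List.mem_cons.mp hd' with rfl | hd'
        · have hin : pvInb m n (pvNbr c d') = true := (pvInb_iff m n _).mpr hI'
          have hle : T (pvNbr c d') ≤ T c + 1 := by
            by_contra hcon
            exact hg (by simp [hin]; omega)
          calc (l.foldl (pvMStep m n c) (T, q)).1 (pvNbr c d') ≤ T (pvNbr c d') := hmono' _
            _ ≤ T c + 1 := hle
            _ = (l.foldl (pvMStep m n c) (T, q)).1 c + 1 := by rw [hc']
        · exact hdirs' d' hd' hI'

lemma pvMLoopCorrect (m n : Int) (monsters : List (Int × Int)) :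
    ∀ (fuel : Nat) (T : (Int × Int) → Int) (q : List (Int × Int)),
    pvMCore m n monsters T q →
    (∀ x, pvI m n x → x ∉ q → pvEdge m n T x) →
    pvSum m n T + q.length < fuel →
    (∀ c, 0 ≤ pvMLoop m n fuel T q c ∧ pvMLoop m n fuel T q c ≤ pvINF) ∧
    (∀ c, pvBDm m n monsters c ≤ pvMLoop m n fuel T q c) ∧
    (∀ mo ∈ monsters.filter (pvInb m n), pvMLoop m n fuel T q mo = 0) ∧
    (∀ x, pvI m n x → pvEdge m n (pvMLoop m n fuel T q) x) := by
  intro fuel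
  induction fuel with
  | zero => intro T q _ _ hf; omega
  | succ fuel ih =>
      intro T q h hedge hf
      obtain ⟨ha, hb, hlow, hmon⟩ := h
      match q with
      | [] =>
          refine ⟨fun c => ha c, fun c => hlow c, fun mo hmo => hmon mo hmo, ?_⟩
          intro x hx
          exact hedge x hx (by simp)
      | c :: rest =>
          have hc : pvI m n c := hb c (by simp)
          have hcore : pvMCore m n monsters T rest :=
            ⟨ha, fun z hz => hb z (by simp [hz]), hlow, hmon⟩
          obtain ⟨hcore', hmono', hc', ⟨app, happ, hch⟩, hdirs', hsum'⟩ :=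
            pvMInner m n monsters c pvDirs (fun d h => h) T rest hcore
          have hloop : pvMLoop m n (fuel + 1) T (c :: rest) =
              pvMLoop m n fuel (pvDirs.foldl (pvMStep m n c) (T, rest)).1
                (pvDirs.foldl (pvMStep m n c) (T, rest)).2 := rfl
          rw [hloop]
          refine ih _ _ hcore' ?_ ?_
          · intro x hx hxq
            by_cases hxc : x = c
            · subst hxc
              intro d hd hI
              exact hdirs' d hd hI
            · have hxr : x ∉ rest ∧ x ∉ app := by
                rw [happ] at hxq
                simp at hxq
                exact ⟨fun hh => hxq.1 hh, fun hh => hxq.2 hh⟩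
              have hxT : (pvDirs.foldl (pvMStep m n c) (T, rest)).1 x = T x := by
                by_contra hcon
                exact hxr.2 (hch x hcon)
              intro d hd hI
              have hold := hedge x hx (by simp [hxc, hxr.1]) d hd hI
              have := hmono' (pvNbr x d)
              omega
          · simp at hf
            omega

lemma pvTmUB (m n : Int) (monsters : List (Int × Int)) (T : (Int × Int) → Int)
    (hmon : ∀ mo ∈ monsters.filter (pvInb m n), T mo = 0)
    (hedge : ∀ x, pvI m n x → pvEdge m n T x)
    {mo : Int × Int} (hmo : mo ∈ monsters.filter (pvInb m n)) :
    ∀ (k : Nat) (c : Int × Int), pvI m n c → (pvMd c mo).toNat ≤ k → T c ≤ pvMd c mo := by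
  intro k
  induction k with
  | zero =>
      intro c hc hk
      have h0 : pvMd c mo = 0 := by have := pvMd_nonneg c mo; omega
      have e := pvMd_eq_zero h0
      rw [e, hmon mo hmo, pvMd_self]
  | succ k ih =>
      intro c hc hk
      by_cases hcm : c = mo
      · rw [hcm, hmon mo hmo, pvMd_self]
      · have hmoI : pvI m n mo := (pvInb_iff m n mo).mp (List.of_mem_filter hmo)
        obtain ⟨d, hd, hI', hdec⟩ := pvStraighten m n hc hmoI hcm
        have hnn := pvMd_nonneg (pvNbr c d) mo
        have hk' : (pvMd (pvNbr c d) mo).toNat ≤ k := by omega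
        have h1 := ih (pvNbr c d) hI' hk'
        obtain ⟨d', hd', hback⟩ := pvNeg_mem hd
        have h2 := hedge (pvNbr c d) hI' d' hd' (by rw [hback c]; exact hc)
        rw [hback c] at h2
        omega

lemma pvTmChar (m n : Int) (monsters : List (Int × Int)) (T : (Int × Int) → Int)
    (h0 : ∀ c, 0 ≤ T c ∧ T c ≤ pvINF)
    (hlow : ∀ c, pvBDm m n monsters c ≤ T c)
    (hmon : ∀ mo ∈ monsters.filter (pvInb m n), T mo = 0)
    (hedge : ∀ x, pvI m n x → pvEdge m n T x) :
    ∀ c, pvI m n c → T c = pvBDm m n monsters c := by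
  intro c hc
  refine le_antisymm ?_ (hlow c)
  refine pvLe_pvBDm m n monsters (h0 c).2 (fun mo hmo => ?_)
  exact pvTmUB m n monsters T hmon hedge hmo (pvMd c mo).toNat c hc (le_refl _)

lemma pvInitChar (m n : Int) :
    ∀ (l : List (Int × Int)) (T : (Int × Int) → Int) (q : List (Int × Int)),
      l.foldl (fun (s : ((Int × Int) → Int) × List (Int × Int)) mo =>
        if pvInb m n mo then (fun z => if z = mo then 0 else s.1 z, s.2 ++ [mo]) else s) (T, q)
      = (fun c => if c ∈ l.filter (pvInb m n) then 0 else T c, q ++ l.filter (pvInb m n)) := by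
  intro l
  induction l with
  | nil =>
      intro T q
      refine Prod.ext (funext fun z => by simp) (by simp)
  | cons x xs ih =>
      intro T q
      by_cases hx : pvInb m n x
      · simp only [List.foldl_cons, if_pos hx]
        rw [ih]
        refine Prod.ext (funext fun z => ?_) ?_
        · simp only [List.filter_cons, hx]
          by_cases hz : z = x
          · subst hz; simp
          · simp [hz]
        · simp [List.filter_cons, hx]
      · simp only [List.foldl_cons, if_neg hx]
        rw [ih]
        refine Prod.ext (funext fun z => ?_) ?_
        · simp [List.filter_cons, hx]
        · simp [List.filter_cons, hx]

-- the Tm produced by A's monster phase is exactly pvBDm on the grid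
lemma pvATmChar (m n : Int) (monsters : List (Int × Int)) :
    ∀ c, pvI m n c →
      pvMLoop m n (m.toNat * n.toNat * 10 ^ 9 + monsters.length + 1)
        (fun z => if z ∈ monsters.filter (pvInb m n) then 0 else pvINF)
        (monsters.filter (pvInb m n)) c
      = pvBDm m n monsters c := by
  set T0 : (Int × Int) → Int := fun z => if z ∈ monsters.filter (pvInb m n) then 0 else pvINF
    with hT0
  have hINF := pvINF_pos
  have ha : ∀ c, 0 ≤ T0 c ∧ T0 c ≤ pvINF := by
    intro c; by_cases hc : c ∈ monsters.filter (pvInb m n) <;> simp [hT0, hc] <;> omega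
  have hcore : pvMCore m n monsters T0 (monsters.filter (pvInb m n)) := by
    refine ⟨ha, ?_, ?_, ?_⟩
    · intro c hc; exact (pvInb_iff m n c).mp (List.of_mem_filter hc)
    · intro c
      by_cases hc : c ∈ monsters.filter (pvInb m n)
      · have h1 := pvBDm_le_mem m n monsters (c := c) hc
        rw [pvMd_self] at h1
        show pvBDm m n monsters c ≤ if c ∈ monsters.filter (pvInb m n) then 0 else pvINF
        rw [if_pos hc]; exact h1
      · show pvBDm m n monsters c ≤ if c ∈ monsters.filter (pvInb m n) then 0 else pvINF
        rw [if_neg hc]; exact pvBDm_le_INF m n monsters c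
    · intro mo hmo
      show (if mo ∈ monsters.filter (pvInb m n) then (0 : Int) else pvINF) = 0
      rw [if_pos hmo]
  have hedge : ∀ x, pvI m n x → x ∉ monsters.filter (pvInb m n) → pvEdge m n T0 x := by
    intro x _ hx d hd _
    have hx0 : T0 x = pvINF := by
      show (if x ∈ monsters.filter (pvInb m n) then (0 : Int) else pvINF) = pvINF
      rw [if_neg hx]
    have := (ha (pvNbr x d)).2
    omega
  have hfuel : pvSum m n T0 + (monsters.filter (pvInb m n)).length <
      m.toNat * n.toNat * 10 ^ 9 + monsters.length + 1 := by
    have h1 := pvSum_le m n T0 (fun c => (ha c).2)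
    have h2 := List.length_filter_le (pvInb m n) monsters
    omega
  obtain ⟨h0', hlow', hmon', hedge'⟩ :=
    pvMLoopCorrect m n monsters _ T0 (monsters.filter (pvInb m n)) hcore hedge hfuel
  exact pvTmChar m n monsters _ h0' hlow' hmon' hedge'

-- ---------- player BFS: invariant, termination, characterization ----------
lemma pvPairwise_congr {f g : (Int × Int) → Int} :
    ∀ {l : List (Int × Int)}, (∀ c ∈ l, f c = g c) →
      l.Pairwise (fun a b => f a ≤ f b) → l.Pairwise (fun a b => g a ≤ g b) := by
  intro l
  induction l with
  | nil => intro _ _; exact List.Pairwise.nil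
  | cons y ys ih =>
      intro h hp
      rcases List.pairwise_cons.mp hp with ⟨hy, hys⟩
      refine List.pairwise_cons.mpr ⟨?_, ih (fun c hc => h c (by simp [hc])) hys⟩
      intro b hb
      rw [← h y (by simp), ← h b (by simp [hb])]
      exact hy b hb

lemma pvPairwise_of_forall {R : (Int × Int) → (Int × Int) → Prop} :
    ∀ (l : List (Int × Int)), (∀ a ∈ l, ∀ b ∈ l, R a b) → l.Pairwise R := by
  intro l
  induction l with
  | nil => intro _; exact List.Pairwise.nil
  | cons y ys ih =>
      intro h
      exact List.pairwise_cons.mpr ⟨fun b hb => h y (by simp) b (by simp [hb]),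
        ih (fun a ha b hb => h a (by simp [ha]) b (by simp [hb]))⟩

lemma pvHead_le {f : (Int × Int) → Int} :
    ∀ (l : List (Int × Int)), l.Pairwise (fun a b => f a ≤ f b) →
      ∀ hh ∈ l.head?, ∀ b ∈ l, f hh ≤ f b := by
  intro l hl hh hmem b hb
  cases l with
  | nil => simp at hmem
  | cons y ys =>
      have hhy : hh = y := by simpa using hmem.symm
      subst hhy
      rcases List.mem_cons.mp hb with rfl | hb
      · exact le_refl _
      · exact (List.pairwise_cons.mp hl).1 b hb

def pvPInv (m n : Int) (Tm : (Int × Int) → Int) (start : Int × Int)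
    (T : (Int × Int) → Int) (best : Int) (q : List (Int × Int)) : Prop :=
  (∀ c, T c ≠ -1 → pvI m n c ∧ T c = pvMd c start) ∧
  T start ≠ -1 ∧
  q.Nodup ∧
  (∀ c ∈ q, T c ≠ -1) ∧
  q.Pairwise (fun a b => T a ≤ T b) ∧
  (∀ a ∈ q, ∀ b ∈ q, T b ≤ T a + 1) ∧
  (∀ c, pvI m n c → T c = -1 → ∀ hh ∈ q.head?, T hh + 1 ≤ pvMd c start) ∧
  (∀ c, T c ≠ -1 → c ∉ q → ∀ d ∈ pvDirs, pvI m n (pvNbr c d) → T (pvNbr c d) ≠ -1) ∧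
  (∀ c, T c ≠ -1 → c ∉ q → pvMd c start < Tm c → pvMd c start ≤ best) ∧
  (best = -1 ∨ ∃ c, T c ≠ -1 ∧ c ∉ q ∧ pvMd c start < Tm c ∧ best = pvMd c start)

lemma pvPStep_eq (m n : Int) (x : Int × Int) (t : Int) (T : (Int × Int) → Int)
    (q : List (Int × Int)) (d : Int × Int) :
    pvPStep m n x t (T, q) d =
      if pvInb m n (pvNbr x d) && decide (T (pvNbr x d) = -1) then
        (fun z => if z = pvNbr x d then t + 1 else T z, q ++ [pvNbr x d])
      else (T, q) := rfl

lemma pvPInner (m n : Int) (start x : Int × Int) (t : Int)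
    (hxI : pvI m n x) (hxv : t = pvMd x start) (ht : 0 ≤ t) :
    ∀ (l : List (Int × Int)), (∀ d ∈ l, d ∈ pvDirs) →
    ∀ (T : (Int × Int) → Int) (q : List (Int × Int)),
    (∀ c, T c ≠ -1 → pvI m n c ∧ T c = pvMd c start) →
    (∀ c, pvI m n c → T c = -1 → t + 1 ≤ pvMd c start) →
    ∃ app,
      (l.foldl (pvPStep m n x t) (T, q)).2 = q ++ app ∧
      (∀ c, (l.foldl (pvPStep m n x t) (T, q)).1 c ≠ T c →
        T c = -1 ∧ (l.foldl (pvPStep m n x t) (T, q)).1 c = t + 1 ∧ c ∈ app) ∧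
      (∀ c ∈ app, T c = -1 ∧ (l.foldl (pvPStep m n x t) (T, q)).1 c = t + 1 ∧ pvI m n c ∧
        pvMd c start = t + 1) ∧
      app.Nodup ∧
      (∀ c, T c ≠ -1 → (l.foldl (pvPStep m n x t) (T, q)).1 c = T c) ∧
      (∀ d ∈ l, pvI m n (pvNbr x d) → (l.foldl (pvPStep m n x t) (T, q)).1 (pvNbr x d) ≠ -1) ∧
      pvU m n (l.foldl (pvPStep m n x t) (T, q)).1 + (l.foldl (pvPStep m n x t) (T, q)).2.length ≤
        pvU m n T + q.length := by
  intro l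
  induction l with
  | nil =>
      intro _ T q _ _
      exact ⟨[], by simp, fun c hc => absurd rfl hc, by simp, List.nodup_nil,
        fun c _ => rfl, by simp, by simp⟩
  | cons d l ih =>
      intro hl T q h1 hfr
      have hd : d ∈ pvDirs := hl d (by simp)
      have hl' : ∀ d' ∈ l, d' ∈ pvDirs := fun d' h' => hl d' (by simp [h'])
      simp only [List.foldl_cons, pvPStep_eq]
      by_cases hg : (pvInb m n (pvNbr x d) && decide (T (pvNbr x d) = -1)) = true
      · rw [if_pos hg]
        rw [Bool.and_eq_true, decide_eq_true_iff] at hg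
        have hI : pvI m n (pvNbr x d) := (pvInb_iff m n _).mp hg.1
        have hund : T (pvNbr x d) = -1 := hg.2
        set T1 : (Int × Int) → Int := fun z => if z = pvNbr x d then t + 1 else T z with hT1e
        have hT1nc : T1 (pvNbr x d) = t + 1 := by simp [hT1e]
        have hmdnc : pvMd (pvNbr x d) start = t + 1 := by
          have hle := pvMd_lip hd x start
          have hge := hfr (pvNbr x d) hI hund
          omega
        have h1' : ∀ c, T1 c ≠ -1 → pvI m n c ∧ T1 c = pvMd c start := by
          intro c hc
          by_cases hcz : c = pvNbr x d
          · subst hcz; exact ⟨hI, by rw [hT1nc, hmdnc]⟩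
          · have he : T1 c = T c := by simp [hT1e, hcz]
            rw [he] at hc ⊢
            exact h1 c hc
        have hfr' : ∀ c, pvI m n c → T1 c = -1 → t + 1 ≤ pvMd c start := by
          intro c hc hTc
          by_cases hcz : c = pvNbr x d
          · subst hcz; rw [hT1nc] at hTc; omega
          · have he : T1 c = T c := by simp [hT1e, hcz]
            rw [he] at hTc
            exact hfr c hc hTc
        obtain ⟨app, happ, hch, hnew, hnodup, hkeep, hprog, hmeas⟩ :=
          ih hl' T1 (q ++ [pvNbr x d]) h1' hfr'
        refine ⟨pvNbr x d :: app, ?_, ?_, ?_, ?_, ?_, ?_, ?_⟩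
        · rw [happ]; simp
        · intro c hc
          by_cases hcc : (List.foldl (pvPStep m n x t) (T1, q ++ [pvNbr x d]) l).1 c = T1 c
          · rw [hcc] at hc ⊢
            have hcz : c = pvNbr x d := by
              by_contra hzz; exact hc (by simp [hT1e, hzz])
            subst hcz
            exact ⟨hund, hT1nc, by simp⟩
          · obtain ⟨hc1, hc2, hc3⟩ := hch c hcc
            refine ⟨?_, hc2, by simp [hc3]⟩
            by_cases hcz : c = pvNbr x d
            · subst hcz; rw [hT1nc] at hc1; omega
            · rw [show T1 c = T c from by simp [hT1e, hcz]] at hc1; exact hc1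
        · intro c hc
          rcases List.mem_cons.mp hc with rfl | hc
          · refine ⟨hund, ?_, hI, hmdnc⟩
            rw [hkeep (pvNbr x d) (by rw [hT1nc]; omega), hT1nc]
          · obtain ⟨hc1, hc2, hc3, hc4⟩ := hnew c hc
            refine ⟨?_, hc2, hc3, hc4⟩
            by_cases hcz : c = pvNbr x d
            · subst hcz; rw [hT1nc] at hc1; omega
            · rw [show T1 c = T c from by simp [hT1e, hcz]] at hc1; exact hc1
        · refine List.nodup_cons.mpr ⟨?_, hnodup⟩
          intro hmem
          have := (hnew _ hmem).1
          rw [hT1nc] at this; omega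
        · intro c hc
          have hcz : c ≠ pvNbr x d := by intro he; rw [he] at hc; exact hc hund
          have he1 : T1 c = T c := by simp [hT1e, hcz]
          rw [hkeep c (by rw [he1]; exact hc), he1]
        · intro d' hd' hI'
          rcases List.mem_cons.mp hd' with rfl | hd'
          · rw [hkeep (pvNbr x d') (by rw [hT1nc]; omega), hT1nc]; omega
          · exact hprog d' hd' hI'
        · have hup := pvU_update m n T (nc := pvNbr x d) (v := t + 1) hI hund (by omega)
          have h2 : pvU m n T1 = pvU m n (fun z => if z = pvNbr x d then t + 1 else T z) := rfl
          simp only [List.length_append, List.length_cons, List.length_nil] at hmeas ⊢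
          omega
      · rw [if_neg hg]
        obtain ⟨app, happ, hch, hnew, hnodup, hkeep, hprog, hmeas⟩ := ih hl' T q h1 hfr
        refine ⟨app, happ, hch, hnew, hnodup, hkeep, ?_, hmeas⟩
        intro d' hd' hI'
        rcases List.mem_cons.mp hd' with rfl | hd'
        · have hin : pvInb m n (pvNbr x d') = true := (pvInb_iff m n _).mpr hI'
          have hnd : T (pvNbr x d') ≠ -1 := by
            intro hcon; exact hg (by simp [hin, hcon])
          rw [hkeep _ hnd]; exact hnd
        · exact hprog d' hd' hI'

lemma pvAllDisc (m n : Int) (start : Int × Int) (T : (Int × Int) → Int)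
    (hs : pvI m n start) (hstart : T start ≠ -1)
    (hcl : ∀ c, T c ≠ -1 → ∀ d ∈ pvDirs, pvI m n (pvNbr c d) → T (pvNbr c d) ≠ -1) :
    ∀ (k : Nat) (c : Int × Int), pvI m n c → (pvMd c start).toNat ≤ k → T c ≠ -1 := by
  intro k
  induction k with
  | zero =>
      intro c hc hk
      have h0 : pvMd c start = 0 := by have := pvMd_nonneg c start; omega
      rw [pvMd_eq_zero h0]; exact hstart
  | succ k ih =>
      intro c hc hk
      by_cases hcs : c = start
      · rw [hcs]; exact hstart
      · obtain ⟨d, hd, hI', hdec⟩ := pvStraighten m n hc hs hcs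
        have hnn := pvMd_nonneg (pvNbr c d) start
        have h1 := ih (pvNbr c d) hI' (by omega)
        obtain ⟨d', hd', hback⟩ := pvNeg_mem hd
        have h2 := hcl (pvNbr c d) h1 d' hd' (by rw [hback c]; exact hc)
        rw [hback c] at h2
        exact h2

lemma pvPLoopCorrect (m n : Int) (Tm : (Int × Int) → Int) (start : Int × Int)
    (hs : pvI m n start) :
    ∀ (fuel : Nat) (T : (Int × Int) → Int) (best : Int) (q : List (Int × Int)),
    pvPInv m n Tm start T best q →
    pvU m n T + q.length < fuel →
    (∀ c, pvI m n c → pvMd c start < Tm c →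
        pvMd c start ≤ pvPLoop m n Tm fuel T best q) ∧
    (pvPLoop m n Tm fuel T best q = -1 ∨
      ∃ c, pvI m n c ∧ pvMd c start < Tm c ∧ pvPLoop m n Tm fuel T best q = pvMd c start) := by
  intro fuel
  induction fuel with
  | zero => intro T best q _ hf; omega
  | succ fuel ih =>
      intro T best q h hf
      obtain ⟨h1, h2, h3, h4, h5, h6, h7, h8, h9, h10⟩ := h
      match q with
      | [] =>
          have hall : ∀ c, pvI m n c → T c ≠ -1 := fun c hc =>
            pvAllDisc m n start T hs h2 (fun c' hc' d hd hI => h8 c' hc' (by simp) d hd hI)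
              (pvMd c start).toNat c hc (le_refl _)
          constructor
          · intro c hc hP
            exact h9 c (hall c hc) (by simp) hP
          · rcases h10 with h10 | ⟨c, hc1, _, hc3, hc4⟩
            · exact Or.inl h10
            · exact Or.inr ⟨c, (h1 c hc1).1, hc3, hc4⟩
      | x :: rest =>
          have hxd : T x ≠ -1 := h4 x (by simp)
          have hxI : pvI m n x := (h1 x hxd).1
          have hxv : T x = pvMd x start := (h1 x hxd).2
          have ht0 : 0 ≤ T x := by rw [hxv]; exact pvMd_nonneg _ _
          have hfr : ∀ c, pvI m n c → T c = -1 → T x + 1 ≤ pvMd c start := by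
            intro c hc hTc
            exact h7 c hc hTc x rfl
          obtain ⟨app, happ, hch, hnew, hnodupapp, hkeep, hprog, hmeas⟩ :=
            pvPInner m n start x (T x) hxI hxv ht0 pvDirs (fun d hd => hd) T rest h1 hfr
          set T1 := (pvDirs.foldl (pvPStep m n x (T x)) (T, rest)).1 with hT1def
          set q2 := (pvDirs.foldl (pvPStep m n x (T x)) (T, rest)).2 with hq2def
          rw [happ] at hq2def
          have hxnotrest : x ∉ rest := (List.nodup_cons.mp h3).1
          have hrestnodup : rest.Nodup := (List.nodup_cons.mp h3).2
          have hxnotapp : x ∉ app := fun hxa => hxd (hnew x hxa).1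
          have happ_rest : ∀ c ∈ app, c ∉ rest := fun c hc hcr =>
            (h4 c (by simp [hcr])) (hnew c hc).1
          have hq1nodup : (rest ++ app).Nodup :=
            List.Nodup.append hrestnodup hnodupapp (fun a ha hb => happ_rest a hb ha)
          have hrestvals : ∀ b ∈ rest, T x ≤ T b ∧ T b ≤ T x + 1 := by
            intro b hb
            exact ⟨(List.pairwise_cons.mp h5).1 b hb, h6 x (by simp) b (by simp [hb])⟩
          have hT1char : ∀ c, T1 c ≠ -1 → pvI m n c ∧ T1 c = pvMd c start := by
            intro c hc
            by_cases heq : T1 c = T c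
            · rw [heq] at hc ⊢; exact h1 c hc
            · obtain ⟨hc1, hc2, hc3⟩ := hch c heq
              obtain ⟨_, _, hc5, hc6⟩ := hnew c hc3
              exact ⟨hc5, by rw [hc2, hc6]⟩
          have hq1vals : ∀ b ∈ rest ++ app, T x ≤ T1 b ∧ T1 b ≤ T x + 1 := by
            intro b hb
            rcases List.mem_append.mp hb with hb | hb
            · rw [hkeep b (h4 b (by simp [hb]))]
              exact hrestvals b hb
            · rw [(hnew b hb).2.1]; omega
          have hq1disc : ∀ c ∈ rest ++ app, T1 c ≠ -1 := by
            intro c hc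
            have := (hq1vals c hc).1
            omega
          have i5 : (rest ++ app).Pairwise (fun a b => T1 a ≤ T1 b) := by
            rw [List.pairwise_append]
            refine ⟨?_, ?_, ?_⟩
            · exact pvPairwise_congr (fun c hc => (hkeep c (h4 c (by simp [hc]))).symm)
                (List.pairwise_cons.mp h5).2
            · refine pvPairwise_of_forall app (fun a ha b hb => ?_)
              rw [(hnew a ha).2.1, (hnew b hb).2.1]
            · intro a ha b hb
              have hva := hq1vals a (List.mem_append_left _ ha)
              rw [(hnew b hb).2.1]
              omega
          have i6 : ∀ a ∈ rest ++ app, ∀ b ∈ rest ++ app, T1 b ≤ T1 a + 1 := by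
            intro a ha b hb
            have := hq1vals a ha; have := hq1vals b hb
            omega
          have i7 : ∀ c, pvI m n c → T1 c = -1 → ∀ hh ∈ (rest ++ app).head?,
              T1 hh + 1 ≤ pvMd c start := by
            intro c hc hTc hh hhmem
            have hhq : hh ∈ rest ++ app := List.mem_of_mem_head? hhmem
            have hTcold : T c = -1 := by
              by_contra hcon
              rw [hkeep c hcon] at hTc
              exact hcon hTc
            have hbase : T x + 1 ≤ pvMd c start := hfr c hc hTcold
            have hv := hq1vals hh hhq
            by_cases hhv : T1 hh ≤ T x
            · omega
            · have hhv1 : T1 hh = T x + 1 := by omega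
              by_contra hcon
              push_neg at hcon
              have hmd : pvMd c start = T x + 1 := by omega
              have hcs : c ≠ start := by
                intro he; rw [he, pvMd_self] at hmd; omega
              obtain ⟨d, hd, hI', hdec⟩ := pvStraighten m n hc hs hcs
              have hmd' : pvMd (pvNbr c d) start = T x := by omega
              by_cases hdisc : T1 (pvNbr c d) = -1
              · have hold : T (pvNbr c d) = -1 := by
                  by_contra hcon2
                  rw [hkeep _ hcon2] at hdisc
                  exact hcon2 hdisc
                have := hfr (pvNbr c d) hI' hold
                omega
              · by_cases hq1m : pvNbr c d ∈ rest ++ app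
                · have hval : T1 (pvNbr c d) = pvMd (pvNbr c d) start := (hT1char _ hdisc).2
                  have hle := pvHead_le (rest ++ app) i5 hh hhmem (pvNbr c d) hq1m
                  omega
                · by_cases hcx : pvNbr c d = x
                  · obtain ⟨d', hd', hback⟩ := pvNeg_mem hd
                    have hc_eq : pvNbr x d' = c := by rw [← hcx, hback c]
                    have := hprog d' hd' (by rw [hc_eq]; exact hc)
                    rw [hc_eq] at this
                    exact this hTc
                  · have hT1eq : T1 (pvNbr c d) = T (pvNbr c d) := by
                      by_contra hcon2
                      exact hq1m (List.mem_append_right _ (hch _ hcon2).2.2)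
                    have hold : T (pvNbr c d) ≠ -1 := by rw [← hT1eq]; exact hdisc
                    have hnotq : pvNbr c d ∉ x :: rest := by
                      simp only [List.mem_cons, not_or]
                      exact ⟨hcx, fun hr => hq1m (List.mem_append_left _ hr)⟩
                    obtain ⟨d', hd', hback⟩ := pvNeg_mem hd
                    have hcl := h8 (pvNbr c d) hold hnotq d' hd' (by rw [hback c]; exact hc)
                    rw [hback c] at hcl
                    exact hcl hTcold
          have i8 : ∀ c, T1 c ≠ -1 → c ∉ rest ++ app → ∀ d ∈ pvDirs, pvI m n (pvNbr c d) →
              T1 (pvNbr c d) ≠ -1 := by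
            intro c hdisc hnq d hd hI'
            by_cases hcx : c = x
            · subst hcx
              exact hprog d hd hI'
            · have hT1eq : T1 c = T c := by
                by_contra hcon
                exact hnq (List.mem_append_right _ (hch c hcon).2.2)
              have hold : T c ≠ -1 := by rw [← hT1eq]; exact hdisc
              have hnotq : c ∉ x :: rest := by
                simp only [List.mem_cons, not_or]
                exact ⟨hcx, fun hr => hnq (List.mem_append_left _ hr)⟩
              have hcl := h8 c hold hnotq d hd hI'
              by_cases hnb : T1 (pvNbr c d) = T (pvNbr c d)
              · rw [hnb]; exact hcl
              · have h21 := (hch _ hnb).2.1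
                rw [h21]
                omega
          have hS : ∀ c, (T1 c ≠ -1 ∧ c ∉ rest ++ app) ↔
              ((T c ≠ -1 ∧ c ∉ x :: rest) ∨ c = x) := by
            intro c
            constructor
            · rintro ⟨hdisc, hnq⟩
              by_cases hcx : c = x
              · exact Or.inr hcx
              · left
                have hnapp : c ∉ app := fun hh => hnq (List.mem_append_right _ hh)
                have heq : T1 c = T c := by
                  by_contra hcon; exact hnapp (hch c hcon).2.2
                refine ⟨by rw [← heq]; exact hdisc, ?_⟩
                simp only [List.mem_cons, not_or]
                exact ⟨hcx, fun hr => hnq (List.mem_append_left _ hr)⟩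
            · rintro (⟨hold, hnotq⟩ | rfl)
              · have hnapp : c ∉ app := fun hh => hold (hnew c hh).1
                refine ⟨by rw [hkeep c hold]; exact hold, ?_⟩
                intro hq1
                rcases List.mem_append.mp hq1 with hr | ha
                · exact hnotq (by simp [hr])
                · exact hnapp ha
              · refine ⟨by rw [hkeep c hxd]; exact hxd, ?_⟩
                intro hq1
                rcases List.mem_append.mp hq1 with hr | ha
                · exact hxnotrest hr
                · exact hxnotapp ha
          set best' := if decide (T x < Tm x) && decide (best < T x) then T x else best
            with hbest'
          have hbb : best ≤ best' := by
            rw [hbest']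
            by_cases hcond : (decide (T x < Tm x) && decide (best < T x)) = true
            · rw [if_pos hcond]
              rw [Bool.and_eq_true, decide_eq_true_iff, decide_eq_true_iff] at hcond
              omega
            · rw [if_neg hcond]
          have i9 : ∀ c, T1 c ≠ -1 → c ∉ rest ++ app → pvMd c start < Tm c →
              pvMd c start ≤ best' := by
            intro c hdisc hnq hP
            rcases (hS c).mp ⟨hdisc, hnq⟩ with ⟨hold, hnotq⟩ | rfl
            · have := h9 c hold hnotq hP
              omega
            · rw [← hxv] at hP ⊢
              rw [hbest']
              by_cases hcond : (decide (T c < Tm c) && decide (best < T c)) = true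
              · rw [if_pos hcond]
              · rw [if_neg hcond]
                rw [Bool.and_eq_true, decide_eq_true_iff, decide_eq_true_iff] at hcond
                push_neg at hcond
                have := hcond hP
                omega
          have i10 : best' = -1 ∨ ∃ c, T1 c ≠ -1 ∧ c ∉ rest ++ app ∧
              pvMd c start < Tm c ∧ best' = pvMd c start := by
            by_cases hcond : (decide (T x < Tm x) && decide (best < T x)) = true
            · right
              have hSx := (hS x).mpr (Or.inr rfl)
              rw [Bool.and_eq_true, decide_eq_true_iff, decide_eq_true_iff] at hcond
              refine ⟨x, hSx.1, hSx.2, ?_, ?_⟩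
              · rw [← hxv]; exact hcond.1
              · rw [hbest', if_pos (by simp [hcond.1, hcond.2]), hxv]
            · rw [hbest', if_neg hcond]
              rcases h10 with h10 | ⟨c, hc1, hc2, hc3, hc4⟩
              · exact Or.inl h10
              · right
                have hSc := (hS c).mpr (Or.inl ⟨hc1, hc2⟩)
                exact ⟨c, hSc.1, hSc.2, hc3, hc4⟩
          have hstep : pvPLoop m n Tm (fuel + 1) T best (x :: rest) =
              pvPLoop m n Tm fuel T1 best' q2 := rfl
          rw [hstep, happ]
          refine ih T1 best' (rest ++ app)
            ⟨hT1char, by rw [hkeep start h2]; exact h2, hq1nodup, hq1disc, i5, i6, i7, i8, i9, i10⟩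
            ?_
          have hlen : (rest ++ app).length = q2.length := by rw [happ]
          rw [hlen]
          simp only [List.length_cons] at hf
          omega
-- ---------- "best value" specification, B's scan, uniqueness ----------
def pvIsBest (m n : Int) (monsters : List (Int × Int)) (start : Int × Int)
    (S : (Int × Int) → Prop) (b : Int) : Prop :=
  (∀ c, S c → pvMd c start < pvBDm m n monsters c → pvMd c start ≤ b) ∧
  (b = -1 ∨ ∃ c, S c ∧ pvMd c start < pvBDm m n monsters c ∧ b = pvMd c start)

lemma pvIsBest_congr (m n : Int) (monsters : List (Int × Int)) (start : Int × Int)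
    (S S' : (Int × Int) → Prop) (h : ∀ c, S c ↔ S' c) (b : Int) :
    pvIsBest m n monsters start S b → pvIsBest m n monsters start S' b := by
  rintro ⟨u, w⟩
  refine ⟨fun c hc hp => u c ((h c).mpr hc) hp, ?_⟩
  rcases w with rfl | ⟨c, hc, hp, he⟩
  · exact Or.inl rfl
  · exact Or.inr ⟨c, (h c).mp hc, hp, he⟩

lemma pvBestUnique (m n : Int) (monsters : List (Int × Int)) (start : Int × Int)
    (S : (Int × Int) → Prop) (b1 b2 : Int)
    (h1 : pvIsBest m n monsters start S b1) (h2 : pvIsBest m n monsters start S b2) :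
    b1 = b2 := by
  obtain ⟨u1, w1⟩ := h1; obtain ⟨u2, w2⟩ := h2
  rcases w1 with rfl | ⟨c1, hc1, hp1, he1⟩
  · rcases w2 with rfl | ⟨c2, hc2, hp2, he2⟩
    · rfl
    · have := u1 c2 hc2 hp2
      have := pvMd_nonneg c2 start
      omega
  · rcases w2 with rfl | ⟨c2, hc2, hp2, he2⟩
    · have := u2 c1 hc1 hp1
      have := pvMd_nonneg c1 start
      omega
    · have := u1 c2 hc2 hp2
      have := u2 c1 hc1 hp1
      omega

lemma pvBFoldInner (m n : Int) (monsters : List (Int × Int)) (start : Int × Int) (i : Int) :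
    ∀ (l : List Int) (acc : Int) (S : (Int × Int) → Prop),
      pvIsBest m n monsters start S acc →
      pvIsBest m n monsters start (fun c => S c ∨ ∃ j ∈ l, c = (i, j))
        (l.foldl (fun best j =>
          if decide ((|i - start.1| + |j - start.2|) < pvBDm m n monsters (i, j)) &&
              decide (best < (|i - start.1| + |j - start.2|)) then
            (|i - start.1| + |j - start.2|) else best) acc) := by
  intro l
  induction l with
  | nil =>
      intro acc S h
      refine pvIsBest_congr m n monsters start _ _ (fun c => ?_) _ h
      simp
  | cons j l ih =>
      intro acc S h
      simp only [List.foldl_cons]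
      have hmd : pvMd (i, j) start = |i - start.1| + |j - start.2| := rfl
      by_cases hcond : (decide ((|i - start.1| + |j - start.2|) < pvBDm m n monsters (i, j)) &&
          decide (acc < (|i - start.1| + |j - start.2|))) = true
      · rw [if_pos hcond]
        rw [Bool.and_eq_true, decide_eq_true_iff, decide_eq_true_iff] at hcond
        have hnext : pvIsBest m n monsters start (fun c => S c ∨ c = (i, j))
            (|i - start.1| + |j - start.2|) := by
          constructor
          · intro c hc hP
            rcases hc with hc | rfl
            · have h1 := h.1 c hc hP
              omega
            · rw [hmd]
          · right
            refine ⟨(i, j), Or.inr rfl, ?_, ?_⟩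
            · rw [hmd]; exact hcond.1
            · rw [hmd]
        have hres := ih (|i - start.1| + |j - start.2|) (fun c => S c ∨ c = (i, j)) hnext
        refine pvIsBest_congr m n monsters start _ _ (fun c => ?_) _ hres
        constructor
        · rintro ((hc | rfl) | ⟨j', hj', rfl⟩)
          · exact Or.inl hc
          · exact Or.inr ⟨j, by simp, rfl⟩
          · exact Or.inr ⟨j', by simp [hj'], rfl⟩
        · rintro (hc | ⟨j', hj', rfl⟩)
          · exact Or.inl (Or.inl hc)
          · rcases List.mem_cons.mp hj' with rfl | hj'
            · exact Or.inl (Or.inr rfl)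
            · exact Or.inr ⟨j', hj', rfl⟩
      · rw [if_neg hcond]
        have hcond' : |i - start.1| + |j - start.2| < pvBDm m n monsters (i, j) →
            |i - start.1| + |j - start.2| ≤ acc := by
          intro hlt
          by_contra hgt
          refine hcond ?_
          rw [Bool.and_eq_true]
          exact ⟨by rw [decide_eq_true_iff]; exact hlt, by rw [decide_eq_true_iff]; omega⟩
        have hnext : pvIsBest m n monsters start (fun c => S c ∨ c = (i, j)) acc := by
          constructor
          · intro c hc hP
            rcases hc with hc | rfl
            · exact h.1 c hc hP
            · rw [hmd] at hP ⊢
              exact hcond' hP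
          · rcases h.2 with hb | ⟨c, hc, hp, he⟩
            · exact Or.inl hb
            · exact Or.inr ⟨c, Or.inl hc, hp, he⟩
        have hres := ih acc (fun c => S c ∨ c = (i, j)) hnext
        refine pvIsBest_congr m n monsters start _ _ (fun c => ?_) _ hres
        constructor
        · rintro ((hc | rfl) | ⟨j', hj', rfl⟩)
          · exact Or.inl hc
          · exact Or.inr ⟨j, by simp, rfl⟩
          · exact Or.inr ⟨j', by simp [hj'], rfl⟩
        · rintro (hc | ⟨j', hj', rfl⟩)
          · exact Or.inl (Or.inl hc)
          · rcases List.mem_cons.mp hj' with rfl | hj'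
            · exact Or.inl (Or.inr rfl)
            · exact Or.inr ⟨j', hj', rfl⟩

lemma pvBFoldOuter (m n : Int) (monsters : List (Int × Int)) (start : Int × Int) :
    ∀ (li : List Int) (acc : Int) (S : (Int × Int) → Prop),
      pvIsBest m n monsters start S acc →
      pvIsBest m n monsters start
        (fun c => S c ∨ ∃ i ∈ li, ∃ j, (0 ≤ j ∧ j < n) ∧ c = (i, j))
        (li.foldl (fun best i =>
          (PySem.List.pyRange 0 n 1).foldl (fun best j =>
            if decide ((|i - start.1| + |j - start.2|) < pvBDm m n monsters (i, j)) &&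
                decide (best < (|i - start.1| + |j - start.2|)) then
              (|i - start.1| + |j - start.2|) else best) best) acc) := by
  intro li
  induction li with
  | nil =>
      intro acc S h
      refine pvIsBest_congr m n monsters start _ _ (fun c => ?_) _ h
      simp
  | cons i li ih =>
      intro acc S h
      simp only [List.foldl_cons]
      have hrow := pvBFoldInner m n monsters start i (PySem.List.pyRange 0 n 1) acc S h
      have hnext := ih _ _ hrow
      refine pvIsBest_congr m n monsters start _ _ (fun c => ?_) _ hnext
      constructor
      · rintro ((hc | ⟨j, hj, rfl⟩) | ⟨i', hi', j, hj, rfl⟩)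
        · exact Or.inl hc
        · have hj' := PySem.List.mem_pyRange_one.mp hj
          exact Or.inr ⟨i, by simp, j, ⟨hj'.1, hj'.2⟩, rfl⟩
        · exact Or.inr ⟨i', by simp [hi'], j, hj, rfl⟩
      · rintro (hc | ⟨i', hi', j, hj, rfl⟩)
        · exact Or.inl (Or.inl hc)
        · rcases List.mem_cons.mp hi' with rfl | hi'
          · exact Or.inl (Or.inr ⟨j, PySem.List.mem_pyRange_one.mpr ⟨hj.1, hj.2⟩, rfl⟩)
          · exact Or.inr ⟨i', hi', j, hj, rfl⟩

lemma pvBAltBest (m n : Int) (monsters : List (Int × Int)) (start : Int × Int) :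
    pvIsBest m n monsters start (fun c => pvI m n c)
      ((PySem.List.pyRange 0 m 1).foldl (fun best i =>
        (PySem.List.pyRange 0 n 1).foldl (fun best j =>
          if decide ((|i - start.1| + |j - start.2|) < pvBDm m n monsters (i, j)) &&
              decide (best < (|i - start.1| + |j - start.2|)) then
            (|i - start.1| + |j - start.2|) else best) best) (-1)) := by
  have h0 : pvIsBest m n monsters start (fun _ => False) (-1) :=
    ⟨fun c hc => hc.elim, Or.inl rfl⟩
  have h1 := pvBFoldOuter m n monsters start (PySem.List.pyRange 0 m 1) (-1) (fun _ => False) h0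
  refine pvIsBest_congr m n monsters start _ _ (fun c => ?_) _ h1
  constructor
  · rintro (hf | ⟨i, hi, j, ⟨hj1, hj2⟩, rfl⟩)
    · exact hf.elim
    · have hi' := PySem.List.mem_pyRange_one.mp hi
      exact ⟨hi'.1, hi'.2, hj1, hj2⟩
  · intro hc
    right
    exact ⟨c.1, PySem.List.mem_pyRange_one.mpr ⟨hc.1, hc.2.1⟩, c.2,
      ⟨hc.2.2.1, hc.2.2.2⟩, Prod.mk.eta.symm⟩

-- ---------- main equality ----------
theorem pv_main_fn (m : Int) (n : Int) (monsters : List (Int × Int)) (start : Int × Int) :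
    pvAFn m n monsters start = max_survival_time_alt m n monsters start := by
  have hTmEq : (monsters.foldl (fun (s : ((Int × Int) → Int) × List (Int × Int)) mo =>
      if pvInb m n mo then (fun z => if z = mo then 0 else s.1 z, s.2 ++ [mo]) else s)
      ((fun _ => pvINF), ([] : List (Int × Int)))) =
      ((fun c => if c ∈ monsters.filter (pvInb m n) then 0 else pvINF),
        monsters.filter (pvInb m n)) := by
    rw [pvInitChar m n monsters (fun _ => pvINF) []]
    refine Prod.ext (funext fun c => ?_) (by simp)
    by_cases hc : c ∈ monsters.filter (pvInb m n) <;> simp [hc]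
  simp only [pvAFn, max_survival_time_alt, hTmEq]
  by_cases hs : pvInb m n start = true
  · have hsI : pvI m n start := (pvInb_iff m n start).mp hs
    rw [hs]
    simp only [Bool.not_true, if_neg Bool.false_ne_true]
    set TmA := pvMLoop m n (m.toNat * n.toNat * 10 ^ 9 + monsters.length + 1)
      (fun c => if c ∈ monsters.filter (pvInb m n) then 0 else pvINF)
      (monsters.filter (pvInb m n)) with hTmAdef
    have hTm : ∀ c, pvI m n c → TmA c = pvBDm m n monsters c := pvATmChar m n monsters
    rw [hTm start hsI]
    by_cases h0 : (pvBDm m n monsters start == 0) = true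
    · rw [if_pos h0, if_pos h0]
    · rw [if_neg h0, if_neg h0]
      set T0p : (Int × Int) → Int := fun z => if z = start then 0 else -1 with hT0p
      have hT0start : T0p start = 0 := by simp [hT0p]
      have hT0other : ∀ c, c ≠ start → T0p c = -1 := by
        intro c hc; simp [hT0p, hc]
      have hinv : pvPInv m n TmA start T0p (-1) [start] := by
        refine ⟨?_, ?_, ?_, ?_, ?_, ?_, ?_, ?_, ?_, Or.inl rfl⟩
        · intro c hc
          by_cases hcs : c = start
          · subst hcs
            exact ⟨hsI, by rw [hT0start, pvMd_self]⟩
          · exact absurd (hT0other c hcs) hc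
        · rw [hT0start]; omega
        · simp
        · intro c hc
          simp at hc
          subst hc
          rw [hT0start]; omega
        · simp
        · intro a ha b hb
          simp at ha hb
          subst ha; subst hb
          omega
        · intro c hc hTc hh hmem
          have hhs : hh = start := by simpa using hmem.symm
          rw [hhs, hT0start]
          have hcs : c ≠ start := by
            intro he; rw [he, hT0start] at hTc; omega
          have h1 := pvMd_nonneg c start
          have h2 : pvMd c start ≠ 0 := fun he => hcs (pvMd_eq_zero he)
          omega
        · intro c hc hq d hd hI2
          exfalso
          by_cases hcs : c = start
          · exact hq (by simp [hcs])
          · exact hc (hT0other c hcs)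
        · intro c hc hq hP
          exfalso
          by_cases hcs : c = start
          · exact hq (by simp [hcs])
          · exact hc (hT0other c hcs)
      have hfuel : pvU m n T0p + ([start] : List (Int × Int)).length <
          m.toNat * n.toNat + 1 := by
        have hstartG : start ∈ pvG m n := pvMem_G.mpr hsI
        have hsub : (pvG m n).filter (fun c => T0p c = -1) ⊆ (pvG m n).erase start := by
          intro c hc
          rw [Finset.mem_filter] at hc
          obtain ⟨hcg, hcv⟩ := hc
          rw [Finset.mem_erase]
          refine ⟨fun he => ?_, hcg⟩
          rw [he, hT0start] at hcv
          omega
        have h1 := Finset.card_le_card hsub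
        have h2 := Finset.card_erase_of_mem hstartG
        have h3 : 0 < (pvG m n).card := Finset.card_pos.mpr ⟨start, hstartG⟩
        have h4 := pvCard_G m n
        simp only [pvU, List.length_cons, List.length_nil]
        omega
      obtain ⟨uA, wA⟩ := pvPLoopCorrect m n TmA start hsI (m.toNat * n.toNat + 1)
        T0p (-1) [start] hinv hfuel
      have hAbest : pvIsBest m n monsters start (fun c => pvI m n c)
          (pvPLoop m n TmA (m.toNat * n.toNat + 1) T0p (-1) [start]) := by
        constructor
        · intro c hc hP
          exact uA c hc (by rw [hTm c hc]; exact hP)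
        · rcases wA with h | ⟨c, hc, hp, he⟩
          · exact Or.inl h
          · exact Or.inr ⟨c, hc, by rw [← hTm c hc]; exact hp, he⟩
      exact pvBestUnique m n monsters start (fun c => pvI m n c) _ _ hAbest
        (pvBAltBest m n monsters start)
  · have hs' : pvInb m n start = false := by
      cases hfs : pvInb m n start
      · rfl
      · exact absurd hfs hs
    rw [hs']
    simp


-- ---------- the HashMap ports mirror the functional loops ----------
def pvViewM (M : Std.HashMap (Int × Int) Int) : (Int × Int) → Int := fun c => M.getD c pvINF

def pvViewP (M : Std.HashMap (Int × Int) Int) : (Int × Int) → Int := fun c => M.getD c (-1)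

lemma pvView_insertM (M : Std.HashMap (Int × Int) Int) (k : Int × Int) (v : Int) :
    pvViewM (M.insert k v) = fun z => if z = k then v else pvViewM M z := by
  funext z
  simp only [pvViewM, Std.HashMap.getD_insert, beq_iff_eq]
  by_cases hz : z = k
  · simp [hz]
  · simp [hz, Ne.symm hz]

lemma pvView_insertP (M : Std.HashMap (Int × Int) Int) (k : Int × Int) (v : Int) :
    pvViewP (M.insert k v) = fun z => if z = k then v else pvViewP M z := by
  funext z
  simp only [pvViewP, Std.HashMap.getD_insert, beq_iff_eq]
  by_cases hz : z = k
  · simp [hz]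
  · simp [hz, Ne.symm hz]

lemma pvMStepH_eq (m n : Int) (c : Int × Int) (M : Std.HashMap (Int × Int) Int)
    (q : List (Int × Int)) (d : Int × Int) :
    pvMStepH m n c (M, q) d =
      if pvInb m n (pvNbr c d) && decide (M.getD c pvINF + 1 < M.getD (pvNbr c d) pvINF) then
        (M.insert (pvNbr c d) (M.getD c pvINF + 1), q ++ [pvNbr c d])
      else (M, q) := rfl

lemma pvPStepH_eq (m n : Int) (c : Int × Int) (t : Int) (M : Std.HashMap (Int × Int) Int)
    (q : List (Int × Int)) (d : Int × Int) :
    pvPStepH m n c t (M, q) d =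
      if pvInb m n (pvNbr c d) && decide (M.getD (pvNbr c d) (-1) = -1) then
        (M.insert (pvNbr c d) (t + 1), q ++ [pvNbr c d])
      else (M, q) := rfl

lemma pvMFold_sim (m n : Int) (c : Int × Int) :
    ∀ (l : List (Int × Int)) (M : Std.HashMap (Int × Int) Int) (q : List (Int × Int)),
      pvViewM (l.foldl (pvMStepH m n c) (M, q)).1 =
        (l.foldl (pvMStep m n c) (pvViewM M, q)).1 ∧
      (l.foldl (pvMStepH m n c) (M, q)).2 = (l.foldl (pvMStep m n c) (pvViewM M, q)).2 := by
  intro l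
  induction l with
  | nil => intro M q; exact ⟨rfl, rfl⟩
  | cons d l ih =>
      intro M q
      simp only [List.foldl_cons, pvMStep_eq, pvMStepH_eq]
      by_cases hg : (pvInb m n (pvNbr c d) &&
          decide (M.getD c pvINF + 1 < M.getD (pvNbr c d) pvINF)) = true
      · have hgF : (pvInb m n (pvNbr c d) &&
            decide (pvViewM M c + 1 < pvViewM M (pvNbr c d))) = true := hg
        rw [if_pos hg, if_pos hgF]
        have h1 := ih (M.insert (pvNbr c d) (M.getD c pvINF + 1)) (q ++ [pvNbr c d])
        rw [pvView_insertM] at h1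
        exact h1
      · have hgF : ¬ (pvInb m n (pvNbr c d) &&
            decide (pvViewM M c + 1 < pvViewM M (pvNbr c d))) = true := hg
        rw [if_neg hg, if_neg hgF]
        exact ih M q

lemma pvPFold_sim (m n : Int) (c : Int × Int) (t : Int) :
    ∀ (l : List (Int × Int)) (M : Std.HashMap (Int × Int) Int) (q : List (Int × Int)),
      pvViewP (l.foldl (pvPStepH m n c t) (M, q)).1 =
        (l.foldl (pvPStep m n c t) (pvViewP M, q)).1 ∧
      (l.foldl (pvPStepH m n c t) (M, q)).2 = (l.foldl (pvPStep m n c t) (pvViewP M, q)).2 := by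
  intro l
  induction l with
  | nil => intro M q; exact ⟨rfl, rfl⟩
  | cons d l ih =>
      intro M q
      simp only [List.foldl_cons, pvPStep_eq, pvPStepH_eq]
      by_cases hg : (pvInb m n (pvNbr c d) && decide (M.getD (pvNbr c d) (-1) = -1)) = true
      · have hgF : (pvInb m n (pvNbr c d) && decide (pvViewP M (pvNbr c d) = -1)) = true := hg
        rw [if_pos hg, if_pos hgF]
        have h1 := ih (M.insert (pvNbr c d) (t + 1)) (q ++ [pvNbr c d])
        rw [pvView_insertP] at h1
        exact h1
      · have hgF : ¬ (pvInb m n (pvNbr c d) && decide (pvViewP M (pvNbr c d) = -1)) = true := hg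
        rw [if_neg hg, if_neg hgF]
        exact ih M q

lemma pvMLoop_sim (m n : Int) :
    ∀ (fuel : Nat) (M : Std.HashMap (Int × Int) Int) (q : List (Int × Int)),
      pvViewM (pvMLoopH m n fuel M q) = pvMLoop m n fuel (pvViewM M) q := by
  intro fuel
  induction fuel with
  | zero => intro M q; rfl
  | succ fuel ih =>
      intro M q
      match q with
      | [] => rfl
      | c :: rest =>
          have hstepH : pvMLoopH m n (fuel + 1) M (c :: rest) =
              pvMLoopH m n fuel (pvDirs.foldl (pvMStepH m n c) (M, rest)).1
                (pvDirs.foldl (pvMStepH m n c) (M, rest)).2 := rfl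
          have hstepF : pvMLoop m n (fuel + 1) (pvViewM M) (c :: rest) =
              pvMLoop m n fuel (pvDirs.foldl (pvMStep m n c) (pvViewM M, rest)).1
                (pvDirs.foldl (pvMStep m n c) (pvViewM M, rest)).2 := rfl
          rw [hstepH, hstepF]
          obtain ⟨h1, h2⟩ := pvMFold_sim m n c pvDirs M rest
          rw [ih, h1, h2]

lemma pvPLoop_sim (m n : Int) (TmH : Std.HashMap (Int × Int) Int) :
    ∀ (fuel : Nat) (M : Std.HashMap (Int × Int) Int) (best : Int) (q : List (Int × Int)),
      pvPLoopH m n TmH fuel M best q =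
        pvPLoop m n (pvViewM TmH) fuel (pvViewP M) best q := by
  intro fuel
  induction fuel with
  | zero => intro M best q; rfl
  | succ fuel ih =>
      intro M best q
      match q with
      | [] => rfl
      | c :: rest =>
          have hstepH : pvPLoopH m n TmH (fuel + 1) M best (c :: rest) =
              pvPLoopH m n TmH fuel
                (pvDirs.foldl (pvPStepH m n c (M.getD c (-1))) (M, rest)).1
                (if decide (M.getD c (-1) < TmH.getD c pvINF) && decide (best < M.getD c (-1))
                  then M.getD c (-1) else best)
                (pvDirs.foldl (pvPStepH m n c (M.getD c (-1))) (M, rest)).2 := rfl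
          have hstepF : pvPLoop m n (pvViewM TmH) (fuel + 1) (pvViewP M) best (c :: rest) =
              pvPLoop m n (pvViewM TmH) fuel
                (pvDirs.foldl (pvPStep m n c (M.getD c (-1))) (pvViewP M, rest)).1
                (if decide (M.getD c (-1) < TmH.getD c pvINF) && decide (best < M.getD c (-1))
                  then M.getD c (-1) else best)
                (pvDirs.foldl (pvPStep m n c (M.getD c (-1))) (pvViewP M, rest)).2 := rfl
          rw [hstepH, hstepF]
          obtain ⟨h1, h2⟩ := pvPFold_sim m n c (M.getD c (-1)) pvDirs M rest
          rw [ih, h1, h2]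

lemma pvInit_sim (m n : Int) :
    ∀ (l : List (Int × Int)) (M : Std.HashMap (Int × Int) Int) (q : List (Int × Int)),
      pvViewM (l.foldl (fun (s : Std.HashMap (Int × Int) Int × List (Int × Int)) mo =>
          if pvInb m n mo then (s.1.insert mo 0, s.2 ++ [mo]) else s) (M, q)).1 =
        (l.foldl (fun (s : ((Int × Int) → Int) × List (Int × Int)) mo =>
          if pvInb m n mo then (fun z => if z = mo then 0 else s.1 z, s.2 ++ [mo]) else s)
          (pvViewM M, q)).1 ∧
      (l.foldl (fun (s : Std.HashMap (Int × Int) Int × List (Int × Int)) mo =>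
          if pvInb m n mo then (s.1.insert mo 0, s.2 ++ [mo]) else s) (M, q)).2 =
        (l.foldl (fun (s : ((Int × Int) → Int) × List (Int × Int)) mo =>
          if pvInb m n mo then (fun z => if z = mo then 0 else s.1 z, s.2 ++ [mo]) else s)
          (pvViewM M, q)).2 := by
  intro l
  induction l with
  | nil => intro M q; exact ⟨rfl, rfl⟩
  | cons mo l ih =>
      intro M q
      simp only [List.foldl_cons]
      by_cases hmo : pvInb m n mo = true
      · rw [if_pos hmo, if_pos hmo]
        have h1 := ih (M.insert mo 0) (q ++ [mo])
        rw [pvView_insertM] at h1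
        exact h1
      · rw [if_neg hmo, if_neg hmo]
        exact ih M q

lemma pvA_eq_fn (m : Int) (n : Int) (monsters : List (Int × Int)) (start : Int × Int) :
    max_survival_time m n monsters start = pvAFn m n monsters start := by
  simp only [max_survival_time, pvAFn]
  obtain ⟨hI1, hI2⟩ := pvInit_sim m n monsters ∅ []
  have hEmpty : pvViewM (∅ : Std.HashMap (Int × Int) Int) = fun _ => pvINF := by
    funext z; simp [pvViewM]
  rw [hEmpty] at hI1 hI2
  have hTmV : pvViewM (pvMLoopH m n (m.toNat * n.toNat * 10 ^ 9 + monsters.length + 1)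
      (monsters.foldl (fun (s : Std.HashMap (Int × Int) Int × List (Int × Int)) mo =>
        if pvInb m n mo then (s.1.insert mo 0, s.2 ++ [mo]) else s) (∅, [])).1
      (monsters.foldl (fun (s : Std.HashMap (Int × Int) Int × List (Int × Int)) mo =>
        if pvInb m n mo then (s.1.insert mo 0, s.2 ++ [mo]) else s) (∅, [])).2) =
      pvMLoop m n (m.toNat * n.toNat * 10 ^ 9 + monsters.length + 1)
      (monsters.foldl (fun (s : ((Int × Int) → Int) × List (Int × Int)) mo =>
        if pvInb m n mo then (fun z => if z = mo then 0 else s.1 z, s.2 ++ [mo]) else s)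
        ((fun _ => pvINF), [])).1
      (monsters.foldl (fun (s : ((Int × Int) → Int) × List (Int × Int)) mo =>
        if pvInb m n mo then (fun z => if z = mo then 0 else s.1 z, s.2 ++ [mo]) else s)
        ((fun _ => pvINF), [])).2 := by
    rw [pvMLoop_sim, hI1, hI2]
  have hcond : (pvMLoopH m n (m.toNat * n.toNat * 10 ^ 9 + monsters.length + 1)
      (monsters.foldl (fun (s : Std.HashMap (Int × Int) Int × List (Int × Int)) mo =>
        if pvInb m n mo then (s.1.insert mo 0, s.2 ++ [mo]) else s) (∅, [])).1
      (monsters.foldl (fun (s : Std.HashMap (Int × Int) Int × List (Int × Int)) mo =>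
        if pvInb m n mo then (s.1.insert mo 0, s.2 ++ [mo]) else s) (∅, [])).2).getD start pvINF =
      pvMLoop m n (m.toNat * n.toNat * 10 ^ 9 + monsters.length + 1)
      (monsters.foldl (fun (s : ((Int × Int) → Int) × List (Int × Int)) mo =>
        if pvInb m n mo then (fun z => if z = mo then 0 else s.1 z, s.2 ++ [mo]) else s)
        ((fun _ => pvINF), [])).1
      (monsters.foldl (fun (s : ((Int × Int) → Int) × List (Int × Int)) mo =>
        if pvInb m n mo then (fun z => if z = mo then 0 else s.1 z, s.2 ++ [mo]) else s)
        ((fun _ => pvINF), [])).2 start := by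
    rw [← hTmV]; rfl
  rw [hcond]
  have hstartP : pvViewP ((∅ : Std.HashMap (Int × Int) Int).insert start 0) =
      fun z => if z = start then 0 else -1 := by
    rw [pvView_insertP]
    funext z
    by_cases hz : z = start <;> simp [hz, pvViewP]
  rw [pvPLoop_sim, hTmV, hstartP]

theorem pv_main (m : Int) (n : Int) (monsters : List (Int × Int)) (start : Int × Int) :
    max_survival_time m n monsters start = max_survival_time_alt m n monsters start := by
  rw [pvA_eq_fn]
  exact pv_main_fn m n monsters start

-- ===== VERDICT (by name: the statement is the Claim_ definition above) =====
theorem max_survival_time_spec : Claim_equal_max_survival_time := by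
  intro m n monsters start _
  exact pv_main m n monsters start
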